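-- pv_equiv track=rewrite | github.com/mryanafrizki/unifiedme-ai | unified/proxy_gumloop_v2.py | _safe_flush_point
-- ===== SOURCE A (Python) =====
-- def _safe_flush_point(text: str, start: int) -> int:
--     idx = text.find("<tool_use", start)
--     if idx >= 0:
--         return idx
--     for prefix in ("<tool_us", "<tool_u", "<tool_", "<tool", "<too", "<to", "<t", "<"):
--         if text.endswith(prefix):
--             return len(text) - len(prefix)
--     return len(text)
-- ===== SOURCE B (Python) =====
-- def _safe_flush_point(text: str, start: int) -> int:
--     idx = text.find("<tool_use", start)
--     if idx >= 0:
--         return idx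
--     p = text.rfind("<")
--     if p < 0:
--         return len(text)
--     suffix = text[p:]
--     if len(suffix) <= 8 and suffix == "<tool_use"[:len(suffix)]:
--         return p
--     return len(text)
-- ===== Notes on version B (the rewrite author's own statement) =====
-- stated objective: alternative
-- what changed: The fallback's 8-iteration loop over explicit prefixes of '<tool_use' is replaced by a single backward search for the unique '<' of the tag (rfind) plus one slice comparison of the trailing suffix against the matching prefix of '<tool_use'.
import Mathlib
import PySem

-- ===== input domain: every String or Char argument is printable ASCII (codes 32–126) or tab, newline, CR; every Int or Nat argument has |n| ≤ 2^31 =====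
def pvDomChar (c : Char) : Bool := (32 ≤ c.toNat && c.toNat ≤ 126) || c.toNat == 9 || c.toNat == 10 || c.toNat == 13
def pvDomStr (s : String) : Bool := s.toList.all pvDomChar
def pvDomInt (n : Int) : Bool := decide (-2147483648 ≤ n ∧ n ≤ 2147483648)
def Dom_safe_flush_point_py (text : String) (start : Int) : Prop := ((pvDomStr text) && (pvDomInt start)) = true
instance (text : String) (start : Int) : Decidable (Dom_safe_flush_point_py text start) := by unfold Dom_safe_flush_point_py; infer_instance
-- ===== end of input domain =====

-- B replaces A's 8-case suffix-prefix fallback loop by one backward search for '<' (rfind) plus a single slice comparison; alternative decomposition, same cost.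


-- ===== PORT A =====
-- the for-loop over the tuple of prefixes, with its early return
def pvAForLoop (text : String) : List String → Int
  | [] => PySem.Str.len text
  | p :: rest =>
    if PySem.Str.endswith text p then PySem.Str.len text - PySem.Str.len p
    else pvAForLoop text rest

def safe_flush_point_py (text : String) (start : Int) : Int :=
  let idx := PySem.Str.findFrom text "<tool_use" start
  if idx ≥ 0 then idx
  else pvAForLoop text ["<tool_us", "<tool_u", "<tool_", "<tool", "<too", "<to", "<t", "<"]

-- ===== PORT B =====
def safe_flush_point_py_alt (text : String) (start : Int) : Int :=
  let idx := PySem.Str.findFrom text "<tool_use" start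
  if idx ≥ 0 then idx
  else
    let p := PySem.Str.rfind text "<"
    if p < 0 then PySem.Str.len text
    else
      let suffix := PySem.Str.slice text (some p) none
      if PySem.Str.len suffix ≤ 8 ∧
          suffix = PySem.Str.slice "<tool_use" none (some (PySem.Str.len suffix)) then p
      else PySem.Str.len text

-- ===== PRECONDITION & SPEC =====
def Spec_safe_flush_point_py (text : String) (start : Int) (out : Int) : Prop := out = safe_flush_point_py_alt text start
instance (text : String) (start : Int) (out : Int) : Decidable (Spec_safe_flush_point_py text start out) := by unfold Spec_safe_flush_point_py; infer_instance

-- ===== CLAIM (what is proved, stated in full; the proofs are below) =====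
def Claim_equal_safe_flush_point_py : Prop := ∀ (text : String) (start : Int), Dom_safe_flush_point_py text start → Spec_safe_flush_point_py text start (safe_flush_point_py text start)

-- ===== LEMMAS AND PROOFS =====

-- rfind.go finds the highest index ≤ k at which sub is a prefix of the drop, or -1
theorem go_cases (s sub : List Char) (k : Nat) :
    (PySem.Chars.rfind.go s sub k = -1 ∧ ∀ i ≤ k, sub.isPrefixOf (s.drop i) = false) ∨
    (∃ j : Nat, PySem.Chars.rfind.go s sub k = (j : Int) ∧ j ≤ k ∧ sub.isPrefixOf (s.drop j) = true ∧
      ∀ i, j < i → i ≤ k → sub.isPrefixOf (s.drop i) = false) := by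
  induction k with
  | zero =>
    by_cases h : sub.isPrefixOf s
    · right; exact ⟨0, by simp [PySem.Chars.rfind.go, h], le_refl 0, by simpa using h, by omega⟩
    · left
      constructor
      · simp [PySem.Chars.rfind.go, h]
      · intro i hi
        interval_cases i
        simpa using eq_false_of_ne_true (by simpa using h)
  | succ k ih =>
    by_cases h : sub.isPrefixOf (s.drop (k+1))
    · right
      exact ⟨k+1, by simp [PySem.Chars.rfind.go, h], le_refl _, h, by omega⟩
    · have hgo : PySem.Chars.rfind.go s sub (k+1) = PySem.Chars.rfind.go s sub k := by
        simp [PySem.Chars.rfind.go, h]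
      have hf : sub.isPrefixOf (s.drop (k+1)) = false := eq_false_of_ne_true (by simpa using h)
      rcases ih with ⟨h1, h2⟩ | ⟨j, hj1, hj2, hj3, hj4⟩
      · left
        refine ⟨hgo ▸ h1, fun i hi => ?_⟩
        rcases Nat.lt_or_ge i (k+1) with hlt | hge
        · exact h2 i (by omega)
        · have : i = k+1 := by omega
          subst this; exact hf
      · right
        refine ⟨j, hgo ▸ hj1, by omega, hj3, fun i hi1 hi2 => ?_⟩
        rcases Nat.lt_or_ge i (k+1) with hlt | hge
        · exact hj4 i hi1 (by omega)
        · have : i = k+1 := by omega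
          subst this; exact hf

theorem single_prefix_iff (l : List Char) : (['<'].isPrefixOf l = true) ↔ l[0]? = some '<' := by
  rw [List.isPrefixOf_iff_prefix]
  cases l with
  | nil => simp
  | cons a t =>
    simp only [List.getElem?_cons_zero, Option.some.injEq]
    constructor
    · intro h; rcases h with ⟨t', ht⟩; cases ht; rfl
    · intro h; subst h; exact ⟨t, rfl⟩

theorem ends_iff (cs p : List Char) :
    PySem.Chars.endswith cs p = true ↔ cs.drop (cs.length - p.length) = p := by
  rw [PySem.Chars.endswith, List.isSuffixOf_iff_suffix, List.suffix_iff_eq_drop, eq_comm]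

-- if the last '<' of cs sits at index j, a prefix of "<tool_use" of length m (1 ≤ m ≤ 8) can be a
-- suffix of cs only when it starts exactly at j, i.e. m = cs.length - j
theorem ends_analysis (cs : List Char) (j m : Nat)
    (hcj : cs[j]? = some '<')
    (hmax : ∀ i, j < i → i ≤ cs.length → (['<']).isPrefixOf (cs.drop i) = false)
    (hm1 : 1 ≤ m) (hm8 : m ≤ 8)
    (he : PySem.Chars.endswith cs (List.take m "<tool_use".toList) = true) :
    m = cs.length - j ∧ cs.length - m = j ∧ m ≤ cs.length ∧ cs.drop j = List.take m "<tool_use".toList := by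
  have hTlen : ("<tool_use".toList).length = 9 := by decide
  have hT1 : ∀ i : Fin 9, 1 ≤ (i : Nat) → ("<tool_use".toList)[(i : Nat)]? ≠ some '<' := by decide
  have hj : j < cs.length := by
    rcases List.getElem?_eq_some_iff.mp hcj with ⟨h, _⟩; exact h
  have htake : (List.take m "<tool_use".toList).length = m := by
    rw [List.length_take, hTlen]; omega
  have hd := (ends_iff cs _).mp he
  rw [htake] at hd
  have hmn : m ≤ cs.length := by
    by_contra hc
    have := congrArg List.length hd
    simp at this
    omega
  have h0 : cs[cs.length - m]? = some '<' := by
    have := congrArg (fun l => l[0]?) hd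
    simp only [List.getElem?_drop, Nat.add_zero] at this
    rw [this, List.getElem?_take_of_lt (by omega)]
    decide
  have hle : cs.length - m ≤ j := by
    by_contra hc
    have : (['<']).isPrefixOf (cs.drop (cs.length - m)) = true := by
      rw [single_prefix_iff, List.getElem?_drop, Nat.add_zero]; exact h0
    rw [hmax (cs.length - m) (by omega) (by omega)] at this
    exact absurd this (by simp)
  have heq : cs.length - m = j := by
    by_contra hc
    have hlt : cs.length - m < j := by omega
    have hidx : j - (cs.length - m) < m := by omega
    have : cs[j]? = ("<tool_use".toList)[j - (cs.length - m)]? := by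
      have := congrArg (fun l => l[j - (cs.length - m)]?) hd
      simp only [List.getElem?_drop] at this
      rw [show cs.length - m + (j - (cs.length - m)) = j by omega] at this
      rw [this, List.getElem?_take_of_lt hidx]
    rw [hcj] at this
    exact absurd this.symm (hT1 ⟨j - (cs.length - m), by omega⟩ (by simp; omega))
  refine ⟨by omega, heq, hmn, ?_⟩
  rw [← heq]; exact hd

-- if cs contains no '<' at all, none of the 8 prefixes of "<tool_use" is a suffix of cs
theorem ends_none (cs : List Char)
    (hnone : ∀ i ≤ cs.length, (['<']).isPrefixOf (cs.drop i) = false)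
    (m : Nat) (hm1 : 1 ≤ m) (hm8 : m ≤ 8) :
    PySem.Chars.endswith cs (List.take m "<tool_use".toList) = false := by
  have hTlen : ("<tool_use".toList).length = 9 := by decide
  by_contra hc
  have he : PySem.Chars.endswith cs (List.take m "<tool_use".toList) = true := by
    simpa using hc
  have htake : (List.take m "<tool_use".toList).length = m := by
    rw [List.length_take, hTlen]; omega
  have hd := (ends_iff cs _).mp he
  rw [htake] at hd
  have h0 : (['<']).isPrefixOf (cs.drop (cs.length - m)) = true := by
    rw [single_prefix_iff, hd, List.getElem?_take_of_lt (by omega)]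
    decide
  rw [hnone (cs.length - m) (by omega)] at h0
  exact absurd h0 (by simp)

-- A's for-loop when none of the 8 endswith tests fires
theorem chain_none (text : String)
    (hf : ∀ m, 1 ≤ m → m ≤ 8 → PySem.Chars.endswith text.toList (List.take m "<tool_use".toList) = false) :
    pvAForLoop text ["<tool_us", "<tool_u", "<tool_", "<tool", "<too", "<to", "<t", "<"] = (text.toList.length : Int) := by
  have e8 := hf 8 (by norm_num) (by norm_num); simp at e8
  have e7 := hf 7 (by norm_num) (by norm_num); simp at e7
  have e6 := hf 6 (by norm_num) (by norm_num); simp at e6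
  have e5 := hf 5 (by norm_num) (by norm_num); simp at e5
  have e4 := hf 4 (by norm_num) (by norm_num); simp at e4
  have e3 := hf 3 (by norm_num) (by norm_num); simp at e3
  have e2 := hf 2 (by norm_num) (by norm_num); simp at e2
  have e1 := hf 1 (by norm_num) (by norm_num); simp at e1
  simp [pvAForLoop, PySem.Str.len, e8, e7, e6, e5, e4, e3, e2, e1]

-- A's for-loop when exactly the test of length m0 fires
theorem chain_found (text : String) (m0 : Nat) (h1 : 1 ≤ m0) (h8 : m0 ≤ 8)
    (ht : PySem.Chars.endswith text.toList (List.take m0 "<tool_use".toList) = true)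
    (hf : ∀ m, 1 ≤ m → m ≤ 8 → m ≠ m0 → PySem.Chars.endswith text.toList (List.take m "<tool_use".toList) = false) :
    pvAForLoop text ["<tool_us", "<tool_u", "<tool_", "<tool", "<too", "<to", "<t", "<"] = (text.toList.length : Int) - m0 := by
  have get : ∀ m, 1 ≤ m → m ≤ 8 →
      PySem.Chars.endswith text.toList (List.take m "<tool_use".toList) = (decide (m = m0)) := by
    intro m hm1 hm8
    by_cases h : m = m0
    · subst h; simpa using ht
    · simpa [h] using hf m hm1 hm8 h
  have e8 := get 8 (by norm_num) (by norm_num); simp at e8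
  have e7 := get 7 (by norm_num) (by norm_num); simp at e7
  have e6 := get 6 (by norm_num) (by norm_num); simp at e6
  have e5 := get 5 (by norm_num) (by norm_num); simp at e5
  have e4 := get 4 (by norm_num) (by norm_num); simp at e4
  have e3 := get 3 (by norm_num) (by norm_num); simp at e3
  have e2 := get 2 (by norm_num) (by norm_num); simp at e2
  have e1 := get 1 (by norm_num) (by norm_num); simp at e1
  interval_cases m0 <;> simp_all [pvAForLoop, PySem.Str.len]

-- B's fallback equals A's fallback loop
theorem safe_fb_eq (text : String) :
    (if PySem.Str.rfind text "<" < 0 then PySem.Str.len text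
     else
       if PySem.Str.len (PySem.Str.slice text (some (PySem.Str.rfind text "<")) none) ≤ 8 ∧
           PySem.Str.slice text (some (PySem.Str.rfind text "<")) none
             = PySem.Str.slice "<tool_use" none
                 (some (PySem.Str.len (PySem.Str.slice text (some (PySem.Str.rfind text "<")) none)))
         then PySem.Str.rfind text "<"
       else PySem.Str.len text)
    = pvAForLoop text ["<tool_us", "<tool_u", "<tool_", "<tool", "<too", "<to", "<t", "<"] := by
  have hrfind : PySem.Str.rfind text "<" = PySem.Chars.rfind.go text.toList ['<'] text.toList.length := rfl
  rcases go_cases text.toList ['<'] text.toList.length with ⟨hgo, hnone⟩ | ⟨j, hgo, hjle, hp, hmax⟩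
  · rw [hrfind, hgo, if_pos (by norm_num)]
    rw [chain_none text (fun m h1 h8 => ends_none text.toList hnone m h1 h8)]
    rfl
  · have hcj : text.toList[j]? = some '<' := by
      have := (single_prefix_iff _).mp hp
      rwa [List.getElem?_drop, Nat.add_zero] at this
    have hjn : j < text.toList.length := by
      rcases List.getElem?_eq_some_iff.mp hcj with ⟨h, _⟩; exact h
    rw [hrfind, hgo, if_neg (by exact not_lt.mpr (Int.natCast_nonneg j))]
    have hsuffix : PySem.Str.slice text (some ((j : Int))) none = String.ofList (text.toList.drop j) := by
      rw [PySem.Str.slice]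
      congr 1
      rw [PySem.Chars.slice_eq_listSlice, PySem.List.slice_from _ (Int.natCast_nonneg j)]
      simp
    rw [hsuffix]
    have hlen : PySem.Str.len (String.ofList (text.toList.drop j)) = ((text.toList.length - j : Nat) : Int) := by
      simp [PySem.Str.len]
    rw [hlen]
    have hslice2 : PySem.Str.slice "<tool_use" none (some ((text.toList.length - j : Nat) : Int))
        = String.ofList (List.take (text.toList.length - j) "<tool_use".toList) := by
      rw [PySem.Str.slice]
      congr 1
      rw [PySem.Chars.slice_eq_listSlice, PySem.List.slice_to _ (Int.natCast_nonneg _)]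
      simp
    rw [hslice2]
    by_cases c : (text.toList.length - j ≤ 8 ∧ text.toList.drop j = List.take (text.toList.length - j) "<tool_use".toList)
    · rw [if_pos (by
        refine ⟨by exact_mod_cast c.1, ?_⟩
        rw [String.ofList_inj]; exact c.2)]
      have h1 : 1 ≤ text.toList.length - j := by omega
      rw [chain_found text (text.toList.length - j) h1 c.1
        (by
          rw [ends_iff]
          have : (List.take (text.toList.length - j) "<tool_use".toList).length = text.toList.length - j := by
            rw [List.length_take, show ("<tool_use".toList).length = 9 from by decide]; omega
          rw [this, show text.toList.length - (text.toList.length - j) = j from by omega]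
          exact c.2)
        (by
          intro m hm1 hm8 hne
          by_contra hc
          have he : PySem.Chars.endswith text.toList (List.take m "<tool_use".toList) = true := by simpa using hc
          exact hne (ends_analysis text.toList j m hcj hmax hm1 hm8 he).1)]
      push_cast [Nat.cast_sub (le_of_lt hjn)]
      ring
    · rw [if_neg (by
        intro hcon
        exact c ⟨by exact_mod_cast hcon.1, String.ofList_inj.mp hcon.2⟩)]
      rw [chain_none text (by
        intro m hm1 hm8
        by_contra hc
        have he : PySem.Chars.endswith text.toList (List.take m "<tool_use".toList) = true := by simpa using hc
        obtain ⟨hm, _, hmn, hdrop⟩ := ends_analysis text.toList j m hcj hmax hm1 hm8 he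
        exact c ⟨by omega, by rw [← hm]; exact hdrop⟩)]
      rfl

-- ===== VERDICT (by name: the statement is the Claim_ definition above) =====
theorem safe_flush_point_py_spec : Claim_equal_safe_flush_point_py := by
  intro text start _
  unfold Spec_safe_flush_point_py safe_flush_point_py safe_flush_point_py_alt
  by_cases h : PySem.Str.findFrom text "<tool_use" start ≥ 0
  · rw [if_pos h, if_pos h]
  · rw [if_neg h, if_neg h]
    exact (safe_fb_eq text).symm
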